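-- pv_equiv track=rewrite | github.com/weifan-zhang-aau-phd-course-assignment/hpc-python | mandelbrot-set-py/use_multiprocessing.py | splitListIdx
-- ===== SOURCE A (Python) =====
-- def splitListIdx(lst, m):
--     n = len(lst)
--     k = n // m  # size of every part
--     remainder = n % m
--
--     result = []
--     start = 0
--     for i in range(m):
--         # put remainders in every part averagely
--         size = k + 1 if i < remainder else k
--
--         end = start + size
--         result.append((start, end))
--         start = end
--
--     return result
-- ===== SOURCE B (Python) =====
-- def splitListIdx(lst, m):
--     n = len(lst)
--     k = n // m  # so m = 0 raises ZeroDivisionError just like A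
--     remainder = n % m
--     return [(i * k + min(i, remainder), (i + 1) * k + min(i + 1, remainder))
--             for i in range(m)]
-- ===== Notes on version B (the rewrite author's own statement) =====
-- stated objective: alternative
-- what changed: Replaces the accumulator loop threading a running `start` with a closed-form list comprehension computing each part's boundaries independently as i*k + min(i, remainder).
import Mathlib
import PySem

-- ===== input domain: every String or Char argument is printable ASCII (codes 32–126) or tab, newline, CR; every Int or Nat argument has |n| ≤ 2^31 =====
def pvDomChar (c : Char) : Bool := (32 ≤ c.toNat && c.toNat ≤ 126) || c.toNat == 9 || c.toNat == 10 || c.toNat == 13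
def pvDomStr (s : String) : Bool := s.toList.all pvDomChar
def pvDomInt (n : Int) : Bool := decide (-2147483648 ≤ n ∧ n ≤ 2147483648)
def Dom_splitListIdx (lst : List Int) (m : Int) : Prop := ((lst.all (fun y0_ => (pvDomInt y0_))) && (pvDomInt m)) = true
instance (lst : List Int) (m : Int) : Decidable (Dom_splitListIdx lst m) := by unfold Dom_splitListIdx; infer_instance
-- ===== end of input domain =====

-- B replaces A's accumulator loop (running `start`) with a closed-form comprehension
-- computing each boundary independently; same values, same O(m) cost (objective: alternative).

-- ===== PORT A =====
def splitListIdx (lst : List Int) (m : Int) : List (Int × Int) :=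
  let n : Int := lst.length
  let k := PySem.Int.floordiv n m
  let remainder := PySem.Int.mod n m
  let st := (PySem.List.pyRange 0 m 1).foldl
    (fun (s : List (Int × Int) × Int) i =>
      let size := if i < remainder then k + 1 else k
      let e := s.2 + size
      (s.1 ++ [(s.2, e)], e)) ([], 0)
  st.1

-- ===== PORT B =====
def splitListIdx_alt (lst : List Int) (m : Int) : List (Int × Int) :=
  let n : Int := lst.length
  let k := PySem.Int.floordiv n m
  let remainder := PySem.Int.mod n m
  (PySem.List.pyRange 0 m 1).map
    (fun i => (i * k + min i remainder, (i + 1) * k + min (i + 1) remainder))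

-- ===== PRECONDITION & SPEC =====
-- Python raises ZeroDivisionError at n // m when m = 0; both programs raise there.
def Pre_splitListIdx (lst : List Int) (m : Int) : Prop := m ≠ 0
instance (lst : List Int) (m : Int) : Decidable (Pre_splitListIdx lst m) := by
  unfold Pre_splitListIdx; infer_instance
def pvWitness_splitListIdx : List Int × Int := ([1, 2, 3, 4, 5], 3)

def Spec_splitListIdx (lst : List Int) (m : Int) (out : List (Int × Int)) : Prop := out = splitListIdx_alt lst m
instance (lst : List Int) (m : Int) (out : List (Int × Int)) : Decidable (Spec_splitListIdx lst m out) := by unfold Spec_splitListIdx; infer_instance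

-- ===== CLAIM (what is proved, stated in full; the proofs are below) =====
def Claim_equal_splitListIdx : Prop := ∀ (lst : List Int) (m : Int), Dom_splitListIdx lst m → Pre_splitListIdx lst m → Spec_splitListIdx lst m (splitListIdx lst m)

-- ===== LEMMAS AND PROOFS =====

-- Loop invariant: after folding range(0, j), the accumulator is (B's first j pairs,
-- start = j*k + min j r), provided 0 ≤ r (true for m > 0 by Python's mod sign rule).
theorem splitA_invariant (k r : Int) (hr : 0 ≤ r) (j : Int) (hj : 0 ≤ j) :
    (PySem.List.pyRange 0 j 1).foldl
      (fun (s : List (Int × Int) × Int) i =>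
        let size := if i < r then k + 1 else k
        let e := s.2 + size
        (s.1 ++ [(s.2, e)], e)) ([], 0)
    = ((PySem.List.pyRange 0 j 1).map
        (fun i => (i * k + min i r, (i + 1) * k + min (i + 1) r)),
       j * k + min j r) := by
  induction j using Int.induction_on with
  | zero => simp [PySem.List.pyRange_one_eq_nil, min_eq_left hr]
  | succ j ih =>
    have hj' : (0 : Int) ≤ j := Int.ofNat_nonneg j
    rw [PySem.List.pyRange_one_succ_right (a := 0) (b := (j : Int)) hj', List.foldl_append, ih hj',
        List.map_append]
    simp only [List.foldl_cons, List.foldl_nil, List.map_cons, List.map_nil]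
    have key : ((j : Int) * k + min (j : Int) r + if (j : Int) < r then k + 1 else k)
        = ((j : Int) + 1) * k + min ((j : Int) + 1) r := by
      by_cases h : (j : Int) < r
      · rw [if_pos h, min_eq_left (le_of_lt h), min_eq_left (by omega)]; ring
      · rw [if_neg h, min_eq_right (by omega), min_eq_right (by omega)]; ring
    rw [key]
  | pred j _ => omega

-- ===== VERDICT =====
theorem splitListIdx_spec : Claim_equal_splitListIdx := by
  intro lst m _ hm
  unfold Spec_splitListIdx splitListIdx splitListIdx_alt
  rcases lt_or_gt_of_ne hm with hneg | hpos
  · -- m < 0 : range(m) is empty, both return []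
    simp [PySem.List.pyRange_one_eq_nil (le_of_lt hneg)]
  · -- m > 0 : Python's mod has the divisor's sign, so 0 ≤ n % m
    have hr : 0 ≤ PySem.Int.mod (lst.length : Int) m := by
      have := Int.fmod_nonneg_of_pos (lst.length : Int) hpos
      simpa [PySem.Int.mod] using this
    simp only []
    rw [splitA_invariant _ _ hr m (le_of_lt hpos)]
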